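-- pv_equiv track=rewrite | github.com/4fuu/localagent | src/gateway/formatting.py | _match_inline_marker
-- ===== SOURCE A (Python) =====
-- def _match_inline_marker(text: str, index: int) -> tuple[str, str] | None:
--     for token, kind in (
--         ("**", "bold"),
--         ("__", "bold"),
--         ("~~", "strike"),
--         ("||", "spoiler"),
--         ("*", "italic"),
--         ("_", "italic"),
--     ):
--         if text.startswith(token, index):
--             return kind, token
--     return None
-- ===== SOURCE B (Python) =====
-- def _match_inline_marker(text: str, index: int) -> tuple[str, str] | None:
--     # Dispatch on the single character at index and whether the next character
--     # doubles it, instead of scanning a table of marker tokens.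
--     c = text[index:index + 1]
--     if not c:
--         return None
--     doubled = text[index + 1:index + 2] == c
--     if c == "*" or c == "_":
--         return ("bold", c + c) if doubled else ("italic", c)
--     if doubled and (c == "~" or c == "|"):
--         return ("strike" if c == "~" else "spoiler", c + c)
--     return None
-- ===== Notes on version B (the rewrite author's own statement) =====
-- stated objective: alternative
-- what changed: Instead of scanning six (token, kind) startswith tests, B reads the one character at index and a doubled-flag (is the next character the same?) and decides the kind from that character and the flag, rebuilding the token as c or c+c.
-- outside the precondition, e.g. on _match_inline_marker('a**', -2): A returns ('bold', '**'), B returns ('italic', '*'); on _match_inline_marker('**ab', -100): A returns ('bold', '**'), B returns None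
import Mathlib
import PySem

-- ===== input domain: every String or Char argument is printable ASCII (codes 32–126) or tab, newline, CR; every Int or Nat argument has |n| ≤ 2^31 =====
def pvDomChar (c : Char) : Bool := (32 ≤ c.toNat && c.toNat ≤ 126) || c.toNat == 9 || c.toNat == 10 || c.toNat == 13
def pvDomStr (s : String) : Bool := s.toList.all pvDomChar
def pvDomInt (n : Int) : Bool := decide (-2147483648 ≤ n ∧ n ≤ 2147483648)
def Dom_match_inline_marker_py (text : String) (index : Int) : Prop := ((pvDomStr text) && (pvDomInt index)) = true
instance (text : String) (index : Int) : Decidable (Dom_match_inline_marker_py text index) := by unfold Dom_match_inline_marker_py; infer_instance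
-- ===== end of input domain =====

-- B replaces A's six ordered startswith token tests by reading the single character at
-- index plus a doubled-flag (next char equal?) and deciding the kind from those alone.

-- ===== PORT A =====
-- A's for-loop with early return over the ordered (token, kind) tuple.
-- text.startswith(token, index) is ported as startswith applied to text[index:]
-- (exact: Python normalizes the start argument with slice semantics).
def pvAGo (text : String) (index : Int) : List (String × String) → Option (String × String)
  | [] => none
  | (token, kind) :: rest =>
      if PySem.Str.startswith (PySem.Str.slice text (some index) none) token
      then some (kind, token)
      else pvAGo text index rest

def match_inline_marker_py (text : String) (index : Int) : Option (String × String) :=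
  pvAGo text index
    [("**", "bold"), ("__", "bold"), ("~~", "strike"), ("||", "spoiler"),
     ("*", "italic"), ("_", "italic")]

-- ===== PORT B =====
def match_inline_marker_py_alt (text : String) (index : Int) : Option (String × String) :=
  let c := PySem.Str.slice text (some index) (some (index + 1))
  if c = "" then none
  else
    let doubled := PySem.Str.slice text (some (index + 1)) (some (index + 2)) = c
    if c = "*" ∨ c = "_" then
      if doubled then some ("bold", c ++ c) else some ("italic", c)
    else if doubled ∧ (c = "~" ∨ c = "|") then
      some ((if c = "~" then "strike" else "spoiler"), c ++ c)
    else none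

-- ===== PRECONDITION & SPEC =====
-- Pre_ excludes only the negative indices index < -len(text) or index ∈ {-2, -1}: there A's
-- startswith clamps its start while B's slice bounds normalize differently (text[-2:0] is
-- empty), and either reading of this unspecified corner is defensible (the caller always
-- passes a nonnegative scan position). For -len(text) ≤ index ≤ -3 both normalize alike
-- and equality is proved.
def Pre_match_inline_marker_py (text : String) (index : Int) : Prop :=
  0 ≤ index ∨ (-(text.toList.length : Int) ≤ index ∧ index ≤ -3)
instance (text : String) (index : Int) : Decidable (Pre_match_inline_marker_py text index) := by unfold Pre_match_inline_marker_py; infer_instance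
def pvWitness_match_inline_marker_py : String × Int := ("a**b", 1)

def Spec_match_inline_marker_py (text : String) (index : Int) (out : Option (String × String)) : Prop := out = match_inline_marker_py_alt text index
instance (text : String) (index : Int) (out : Option (String × String)) : Decidable (Spec_match_inline_marker_py text index out) := by unfold Spec_match_inline_marker_py; infer_instance

-- ===== CLAIM (what is proved, stated in full; the proofs are below) =====
def Claim_equal_match_inline_marker_py : Prop := ∀ (text : String) (index : Int), Dom_match_inline_marker_py text index → Pre_match_inline_marker_py text index → Spec_match_inline_marker_py text index (match_inline_marker_py text index)

-- ===== LEMMAS AND PROOFS =====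

-- both ports' decision cores, expressed over d = the list of text's chars from the
-- normalized position: A tests its six tokens as prefixes of d, B looks at d.take 1
-- (the char at index) and (d.drop 1).take 1 (the next char).
theorem pv_core (d : List Char) :
    (if ['*','*'] <+: d then some (("bold":String), ("**":String))
     else if ['_','_'] <+: d then some ("bold", "__")
     else if ['~','~'] <+: d then some ("strike", "~~")
     else if ['|','|'] <+: d then some ("spoiler", "||")
     else if ['*'] <+: d then some ("italic", "*")
     else if ['_'] <+: d then some ("italic", "_")
     else none)
    =
    (let c := String.ofList (d.take 1)
     if c = "" then none
     else
       let doubled := String.ofList ((d.drop 1).take 1) = c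
       if c = "*" ∨ c = "_" then
         if doubled then some (("bold":String), c ++ c) else some (("italic":String), c)
       else if doubled ∧ (c = "~" ∨ c = "|") then
         some (((if c = "~" then "strike" else "spoiler") : String), c ++ c)
       else none) := by
  rcases d with _ | ⟨a, _ | ⟨b, rest⟩⟩
  · decide
  · -- d = [a]
    simp only [List.take, List.drop, List.cons_prefix_cons, List.prefix_nil, and_true]
    have hne : ¬ (String.ofList [a] = "") := by
      intro h; have := congrArg String.toList h; simp at this
    have hd : ¬ (String.ofList ([] : List Char) = String.ofList [a]) := by
      simp
    have h5 : (String.ofList [a] = "*") ↔ a = '*' := by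
      rw [show ("*":String) = String.ofList ['*'] from rfl, String.ofList_inj]; simp
    have h6 : (String.ofList [a] = "_") ↔ a = '_' := by
      rw [show ("_":String) = String.ofList ['_'] from rfl, String.ofList_inj]; simp
    have h7 : (String.ofList [a] = "~") ↔ a = '~' := by
      rw [show ("~":String) = String.ofList ['~'] from rfl, String.ofList_inj]; simp
    have h8 : (String.ofList [a] = "|") ↔ a = '|' := by
      rw [show ("|":String) = String.ofList ['|'] from rfl, String.ofList_inj]; simp
    simp only [hne, hd, h5, h6, h7, h8, if_false, false_and]
    simp only [show ('*' = a) ↔ (a = '*') from eq_comm, show ('_' = a) ↔ (a = '_') from eq_comm,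
      show ('~' = a) ↔ (a = '~') from eq_comm, show ('|' = a) ↔ (a = '|') from eq_comm]
    split_ifs <;> simp_all
  · -- d = a :: b :: rest
    simp only [List.take, List.drop, List.cons_prefix_cons]
    have hne : ¬ (String.ofList [a] = "") := by
      intro h; have := congrArg String.toList h; simp at this
    have hd : (String.ofList [b] = String.ofList [a]) ↔ b = a := by
      rw [String.ofList_inj]; simp
    have h5 : (String.ofList [a] = "*") ↔ a = '*' := by
      rw [show ("*":String) = String.ofList ['*'] from rfl, String.ofList_inj]; simp
    have h6 : (String.ofList [a] = "_") ↔ a = '_' := by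
      rw [show ("_":String) = String.ofList ['_'] from rfl, String.ofList_inj]; simp
    have h7 : (String.ofList [a] = "~") ↔ a = '~' := by
      rw [show ("~":String) = String.ofList ['~'] from rfl, String.ofList_inj]; simp
    have h8 : (String.ofList [a] = "|") ↔ a = '|' := by
      rw [show ("|":String) = String.ofList ['|'] from rfl, String.ofList_inj]; simp
    simp only [hne, hd, h5, h6, h7, h8]
    simp only [show ('*' = a) ↔ (a = '*') from eq_comm, show ('_' = a) ↔ (a = '_') from eq_comm,
      show ('~' = a) ↔ (a = '~') from eq_comm, show ('|' = a) ↔ (a = '|') from eq_comm,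
      show ('*' = b) ↔ (b = '*') from eq_comm, show ('_' = b) ↔ (b = '_') from eq_comm,
      show ('~' = b) ↔ (b = '~') from eq_comm, show ('|' = b) ↔ (b = '|') from eq_comm]
    split_ifs <;> simp_all

theorem pv_slice_str (text : String) (a? b? : Option Int) :
    PySem.Str.slice text a? b? = String.ofList (PySem.List.slice text.toList a? b?) := by
  have h := PySem.Str.toList_slice text a? b?
  rw [← @String.ofList_toList (PySem.Str.slice text a? b?), h]
  simp

theorem pv_slice_neg (xs : List Char) (a b : ℕ) (hb : 0 < b) (hba : b ≤ a) :
    PySem.List.slice xs (some (-(a:Int))) (some (-(b:Int)))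
      = (xs.drop (xs.length - a)).take ((xs.length - b) - (xs.length - a)) := by
  unfold PySem.List.slice
  simp [PySem.List.clampIdx_neg_natCast _ _ hb,
    PySem.List.clampIdx_neg_natCast _ _ (lt_of_lt_of_le hb hba)]

-- both ports, expressed over d = text[index:] as a char list
theorem pv_bridge (text : String) (index : Int) (j : ℕ)
    (hfrom : PySem.Str.slice text (some index) none = String.ofList (text.toList.drop j))
    (hc : PySem.Str.slice text (some index) (some (index + 1))
            = String.ofList ((text.toList.drop j).take 1))
    (hn : PySem.Str.slice text (some (index + 1)) (some (index + 2))
            = String.ofList (((text.toList.drop j).drop 1).take 1)) :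
    match_inline_marker_py text index = match_inline_marker_py_alt text index := by
  have hA : match_inline_marker_py text index
      = (if ['*','*'] <+: text.toList.drop j then some (("bold":String), ("**":String))
         else if ['_','_'] <+: text.toList.drop j then some ("bold", "__")
         else if ['~','~'] <+: text.toList.drop j then some ("strike", "~~")
         else if ['|','|'] <+: text.toList.drop j then some ("spoiler", "||")
         else if ['*'] <+: text.toList.drop j then some ("italic", "*")
         else if ['_'] <+: text.toList.drop j then some ("italic", "_")
         else none) := by
    rw [match_inline_marker_py]
    simp [pvAGo, hfrom, PySem.Chars.startswith_iff]
  have hB : match_inline_marker_py_alt text index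
      = (let c := String.ofList ((text.toList.drop j).take 1)
         if c = "" then none
         else
           let doubled := String.ofList (((text.toList.drop j).drop 1).take 1) = c
           if c = "*" ∨ c = "_" then
             if doubled then some (("bold":String), c ++ c) else some (("italic":String), c)
           else if doubled ∧ (c = "~" ∨ c = "|") then
             some (((if c = "~" then "strike" else "spoiler") : String), c ++ c)
           else none) := by
    rw [match_inline_marker_py_alt, hc, hn]
  rw [hA, hB, pv_core]

-- ===== VERDICT (by name: the statement is the Claim_ definition above) =====
theorem match_inline_marker_py_spec : Claim_equal_match_inline_marker_py := by
  intro text index hdom hpre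
  unfold Spec_match_inline_marker_py
  rcases hpre with hpos | ⟨hge, hle⟩
  · -- 0 ≤ index
    obtain ⟨i, rfl⟩ : ∃ i : ℕ, index = (i : Int) :=
      ⟨index.toNat, (Int.toNat_of_nonneg hpos).symm⟩
    refine pv_bridge text (i : Int) i ?_ ?_ ?_
    · rw [pv_slice_str, PySem.List.slice_from_natCast]
    · rw [pv_slice_str, show ((i:Int) + 1) = (((i + 1 : ℕ)):Int) by push_cast; ring,
        PySem.List.slice_natCast]
      simp
    · rw [pv_slice_str,
        show ((i:Int) + 1) = (((i + 1 : ℕ)):Int) by push_cast; ring,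
        show ((i:Int) + 2) = (((i + 1 : ℕ)):Int) + 1 by push_cast; ring,
        show ((((i + 1 : ℕ)):Int) + 1) = (((i + 2 : ℕ)):Int) by push_cast; ring,
        PySem.List.slice_natCast]
      simp [List.drop_drop]
  · -- -len ≤ index ≤ -3
    set k : ℕ := (-index).toNat with hkdef
    have hkc : ((k : ℕ) : Int) = -index := Int.toNat_of_nonneg (by omega)
    have hidx : index = -((k : ℕ) : Int) := by omega
    have hk3 : 3 ≤ k := by omega
    have hkn : k ≤ text.toList.length := by omega
    refine pv_bridge text index (text.toList.length - k) ?_ ?_ ?_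
    · rw [hidx, pv_slice_str, PySem.List.slice_from_neg_natCast _ _ (by omega)]
    · rw [pv_slice_str,
        show index + 1 = -(((k - 1 : ℕ)):Int) by omega,
        hidx, pv_slice_neg _ _ _ (by omega) (by omega)]
      congr 2
      omega
    · rw [pv_slice_str,
        show index + 1 = -(((k - 1 : ℕ)):Int) by omega,
        show index + 2 = -(((k - 2 : ℕ)):Int) by omega,
        pv_slice_neg _ _ _ (by omega) (by omega)]
      rw [List.drop_drop,
        show text.toList.length - (k - 2) - (text.toList.length - (k - 1)) = 1 by omega,
        show text.toList.length - (k - 1) = text.toList.length - k + 1 by omega]
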